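-- pv_equiv track=rewrite | github.com/Myungbin/Myungbin-bot | bot/data/post_loader.py | merge_and_trim_messages
-- ===== SOURCE A (Python) =====
-- def merge_and_trim_messages(conversations, min_length=5, max_total_length=50):
--     reformatted_data = []
--     conversation = []
--     current_message = ""
--
--     for i in range(len(conversations)):
--         _, _, message = conversations[i]
--
--         # 현재 메시지에 추가
--         if current_message:
--             current_message += " " + message
--         else:
--             current_message = message
--
--         # 메시지가 최소 단어 길이에 도달하거나 대화가 종료되면 새로운 메시지 시작
--         if (
--             len(current_message.split()) >= min_length
--             or i == len(conversations) - 1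
--         ):
--             # 전체 글자 수가 최대 길이를 초과하면 줄임
--             if len(current_message) > max_total_length:
--                 words = current_message.split()
--                 trimmed_message = " ".join(words[:min_length])  # 최소 단어 길이만큼만 유지
--                 conversation.append(trimmed_message)
--                 current_message = " ".join(words[min_length:])  # 남은 부분은 다음 메시지로 이동
--             else:
--                 conversation.append(current_message)
--                 current_message = ""
--
--         if len(conversation) == 10:  # 10개의 메시지를 모으면 대화 추가
--             reformatted_data.append(conversation)
--             conversation = []
--
--     # 마지막 대화 추가
--     if conversation:
--         reformatted_data.append(conversation)
--
--     return reformatted_data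
-- ===== SOURCE B (Python) =====
-- def _absorb_and_flush(cur, msg, is_last, min_length, max_total_length):
--     """Absorb one message into the carry; return (emitted messages, new carry)."""
--     cur = cur + " " + msg if cur else msg
--     if len(cur.split()) >= min_length or is_last:
--         if len(cur) > max_total_length:
--             words = cur.split()
--             return [" ".join(words[:min_length])], " ".join(words[min_length:])
--         return [cur], ""
--     return [], cur
--
--
-- def merge_and_trim_messages(conversations, min_length=5, max_total_length=50):
--     # Phase 1: build the flat list of trimmed messages with a per-item step helper.
--     messages = []
--     cur = ""
--     n = len(conversations)
--     for i in range(n):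
--         _, _, msg = conversations[i]
--         out, cur = _absorb_and_flush(cur, msg, i == n - 1, min_length, max_total_length)
--         messages += out
--     # Phase 2: chunk into batches of 10 by repeated slicing (no running counter).
--     batches = []
--     while messages:
--         batches.append(messages[:10])
--         messages = messages[10:]
--     return batches
-- ===== Notes on version B (the rewrite author's own statement) =====
-- stated objective: alternative
-- what changed: B splits A's single fused loop into two phases: a per-item step helper (_absorb_and_flush) builds one flat list of trimmed messages, and a separate slicing pass chunks it into batches of 10, eliminating A's inline conversation buffer and running 10-counter.
import Mathlib
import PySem

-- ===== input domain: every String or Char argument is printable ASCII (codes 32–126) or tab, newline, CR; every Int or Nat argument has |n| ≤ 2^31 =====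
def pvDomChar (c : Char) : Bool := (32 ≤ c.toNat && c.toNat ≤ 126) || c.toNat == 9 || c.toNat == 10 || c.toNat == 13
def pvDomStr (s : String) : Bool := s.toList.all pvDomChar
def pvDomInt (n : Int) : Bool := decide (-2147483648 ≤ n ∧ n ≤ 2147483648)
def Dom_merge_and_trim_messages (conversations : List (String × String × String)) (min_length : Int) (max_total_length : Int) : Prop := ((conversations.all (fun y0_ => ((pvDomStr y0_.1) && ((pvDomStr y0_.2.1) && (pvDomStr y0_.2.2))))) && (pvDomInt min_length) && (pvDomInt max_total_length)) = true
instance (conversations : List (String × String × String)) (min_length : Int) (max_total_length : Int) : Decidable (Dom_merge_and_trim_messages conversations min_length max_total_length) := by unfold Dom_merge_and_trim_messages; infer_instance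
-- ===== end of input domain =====

-- B separates message-building from batching: a per-item step helper builds one flat
-- message list, then a second pass slices it into batches of 10 (no running 10-counter);
-- same return value as A, objective: alternative decomposition (no speed claim).

-- ===== PORT A =====
-- A's single loop over indices, carrying (reformatted_data, conversation, current_message);
-- the i == len-1 test becomes "tail is empty" in the structural recursion.
def pvLoopA (min_length max_total_length : Int) :
    List (String × String × String) → List (List String) → List String → String → List (List String)
  | [], refo, conv, _cur => if conv ≠ [] then refo ++ [conv] else refo
  | (_, _, message) :: tl, refo, conv, cur =>
    let cur1 := if cur ≠ "" then cur ++ " " ++ message else message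
    let st :=
      if ((PySem.Str.split₀ cur1).length : Int) ≥ min_length ∨ tl = [] then
        if (PySem.Str.len cur1 : Int) > max_total_length then
          let words := PySem.Str.split₀ cur1
          (conv ++ [PySem.Str.join " " (PySem.List.slice words none (some min_length))],
           PySem.Str.join " " (PySem.List.slice words (some min_length) none))
        else (conv ++ [cur1], "")
      else (conv, cur1)
    if st.1.length = 10 then pvLoopA min_length max_total_length tl (refo ++ [st.1]) [] st.2
    else pvLoopA min_length max_total_length tl refo st.1 st.2

def merge_and_trim_messages (conversations : List (String × String × String)) (min_length : Int) (max_total_length : Int) : List (List String) :=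
  pvLoopA min_length max_total_length conversations [] [] ""

-- ===== PORT B =====
-- _absorb_and_flush(cur, msg, is_last, min_length, max_total_length)
def pvEmit (min_length max_total_length : Int) (cur msg : String) (isLast : Prop) [Decidable isLast] :
    List String × String :=
  let cur1 := if cur ≠ "" then cur ++ " " ++ msg else msg
  if ((PySem.Str.split₀ cur1).length : Int) ≥ min_length ∨ isLast then
    if (PySem.Str.len cur1 : Int) > max_total_length then
      let words := PySem.Str.split₀ cur1
      ([PySem.Str.join " " (PySem.List.slice words none (some min_length))],
       PySem.Str.join " " (PySem.List.slice words (some min_length) none))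
    else ([cur1], "")
  else ([], cur1)

-- phase 1: the flat `messages` list (acc), carry `cur`
def pvBuild (min_length max_total_length : Int) :
    List (String × String × String) → String → List String → List String
  | [], _, acc => acc
  | (_, _, m) :: tl, cur, acc =>
    let p := pvEmit min_length max_total_length cur m (tl = [])
    pvBuild min_length max_total_length tl p.2 (acc ++ p.1)

-- phase 2: `while messages: batches.append(messages[:10]); messages = messages[10:]`
def pvChunks : List String → List (List String)
  | [] => []
  | m :: tl =>
    PySem.List.slice (m :: tl) none (some 10) :: pvChunks (PySem.List.slice (m :: tl) (some 10) none)
termination_by msgs => msgs.length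
decreasing_by
  rw [PySem.List.slice_from _ (by omega : (0:Int) ≤ 10)]
  simp only [List.length_drop, List.length_cons]
  omega

def merge_and_trim_messages_alt (conversations : List (String × String × String)) (min_length : Int) (max_total_length : Int) : List (List String) :=
  pvChunks (pvBuild min_length max_total_length conversations "" [])

-- ===== PRECONDITION & SPEC =====
def Spec_merge_and_trim_messages (conversations : List (String × String × String)) (min_length : Int) (max_total_length : Int) (out : List (List String)) : Prop := out = merge_and_trim_messages_alt conversations min_length max_total_length
instance (conversations : List (String × String × String)) (min_length : Int) (max_total_length : Int) (out : List (List String)) : Decidable (Spec_merge_and_trim_messages conversations min_length max_total_length out) := by unfold Spec_merge_and_trim_messages; infer_instance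

-- ===== CLAIM (what is proved, stated in full; the proofs are below) =====
def Claim_equal_merge_and_trim_messages : Prop := ∀ (conversations : List (String × String × String)) (min_length : Int) (max_total_length : Int), Dom_merge_and_trim_messages conversations min_length max_total_length → Spec_merge_and_trim_messages conversations min_length max_total_length (merge_and_trim_messages conversations min_length max_total_length)

-- ===== LEMMAS AND PROOFS =====

theorem pvChunks_nil : pvChunks [] = [] := by rw [pvChunks]

theorem pvChunks_take_drop (m : String) (tl : List String) :
    pvChunks (m :: tl) = (m :: tl).take 10 :: pvChunks ((m :: tl).drop 10) := by
  rw [pvChunks]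
  rw [PySem.List.slice_from _ (by omega : (0:Int) ≤ 10),
      PySem.List.slice_to _ (by omega : (0:Int) ≤ 10)]
  have h10 : (10:Int).toNat = 10 := rfl
  rw [h10]

-- pvBuild's accumulator distributes over append
theorem pvBuild_acc (min_length max_total_length : Int) :
    ∀ (rest : List (String × String × String)) (cur : String) (acc : List String),
      pvBuild min_length max_total_length rest cur acc
        = acc ++ pvBuild min_length max_total_length rest cur [] := by
  intro rest
  induction rest with
  | nil => intro cur acc; simp [pvBuild]
  | cons x tl ih =>
    intro cur acc
    obtain ⟨a, b, m⟩ := x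
    simp only [pvBuild]
    rw [ih, ih (pvEmit min_length max_total_length cur m (tl = [])).2
          ([] ++ (pvEmit min_length max_total_length cur m (tl = [])).1)]
    simp

-- A's batching, replayed as a consumer of the flat message list
def pvChunkAux : List String → List String → List (List String)
  | conv, [] => if conv ≠ [] then [conv] else []
  | conv, m :: tl =>
    if (conv ++ [m]).length = 10 then (conv ++ [m]) :: pvChunkAux [] tl
    else pvChunkAux (conv ++ [m]) tl

theorem pvChunkAux_eq_pvChunks :
    ∀ (msgs conv : List String), conv.length < 10 →
      pvChunkAux conv msgs = pvChunks (conv ++ msgs) := by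
  intro msgs
  induction msgs with
  | nil =>
    intro conv h
    cases conv with
    | nil => simp [pvChunkAux, pvChunks_nil]
    | cons c cs =>
      rw [pvChunkAux]
      simp only [List.append_nil]
      rw [pvChunks_take_drop]
      have h1 : (c :: cs).take 10 = c :: cs := List.take_of_length_le (by simpa using h.le)
      have h2 : (c :: cs).drop 10 = [] := List.drop_of_length_le (by simpa using h.le)
      simp [h1, h2, pvChunks_nil]
  | cons m tl ih =>
    intro conv h
    rw [pvChunkAux]
    by_cases h10 : (conv ++ [m]).length = 10
    · simp only [if_pos h10]
      have hconv : conv ++ m :: tl = (conv ++ [m]) ++ tl := by simp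
      rw [hconv]
      obtain ⟨c', cs', hx⟩ : ∃ c' cs', (conv ++ [m]) ++ tl = c' :: cs' := by
        cases hy : (conv ++ [m]) ++ tl with
        | nil => simp at hy
        | cons a b => exact ⟨a, b, rfl⟩
      rw [hx, pvChunks_take_drop, ← hx]
      have ht : ((conv ++ [m]) ++ tl).take 10 = conv ++ [m] := by
        rw [List.take_append_of_le_length (le_of_eq h10.symm)]
        exact List.take_of_length_le (le_of_eq h10)
      have hd : ((conv ++ [m]) ++ tl).drop 10 = tl := by
        rw [List.drop_append_of_le_length (le_of_eq h10.symm)]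
        simp [List.drop_of_length_le (le_of_eq h10)]
      rw [ht, hd, ih [] (by simp)]
      simp
    · simp only [if_neg h10]
      have hlen : (conv ++ [m]).length < 10 := by
        simp only [List.length_append, List.length_cons, List.length_nil] at h10 ⊢
        omega
      rw [ih (conv ++ [m]) hlen]
      simp

-- main invariant: A's loop = prefix already flushed ++ batching of the flat messages B builds
theorem pvLoopA_eq (min_length max_total_length : Int) :
    ∀ (rest : List (String × String × String)) (refo : List (List String))
      (conv : List String) (cur : String), conv.length < 10 →
      pvLoopA min_length max_total_length rest refo conv cur
        = refo ++ pvChunkAux conv (pvBuild min_length max_total_length rest cur []) := by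
  intro rest
  induction rest with
  | nil =>
    intro refo conv cur _h
    rw [pvLoopA, pvBuild, pvChunkAux]
    split <;> simp_all
  | cons x tl ih =>
    intro refo conv cur h
    obtain ⟨a, b, m⟩ := x
    simp only [pvLoopA, pvBuild, pvEmit]
    rw [pvBuild_acc]
    set cur1 := if cur ≠ "" then cur ++ " " ++ m else m with hcur1
    by_cases hor : ((PySem.Str.split₀ cur1).length : Int) ≥ min_length ∨ tl = []
    · simp only [if_pos hor]
      by_cases hlen : (PySem.Str.len cur1 : Int) > max_total_length
      · simp only [if_pos hlen]
        simp only [List.nil_append, List.singleton_append]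
        rw [pvChunkAux]
        by_cases h10 : (conv ++ [PySem.Str.join " " (PySem.List.slice (PySem.Str.split₀ cur1) none (some min_length))]).length = 10
        · simp only [if_pos h10]
          rw [ih _ [] _ (by norm_num)]
          simp
        · simp only [if_neg h10]
          refine ih _ _ _ ?_
          simp only [List.length_append, List.length_cons, List.length_nil] at h10 ⊢
          omega
      · simp only [if_neg hlen]
        simp only [List.nil_append, List.singleton_append]
        rw [pvChunkAux]
        by_cases h10 : (conv ++ [cur1]).length = 10
        · simp only [if_pos h10]
          rw [ih _ [] _ (by norm_num)]
          simp
        · simp only [if_neg h10]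
          refine ih _ _ _ ?_
          simp only [List.length_append, List.length_cons, List.length_nil] at h10 ⊢
          omega
    · simp only [if_neg hor]
      rw [if_neg (show ¬ conv.length = 10 by omega)]
      simp only [List.nil_append]
      exact ih _ _ _ h

-- ===== VERDICT (by name: the statement is the Claim_ definition above) =====
theorem merge_and_trim_messages_spec : Claim_equal_merge_and_trim_messages := by
  intro conversations min_length max_total_length _hdom
  unfold Spec_merge_and_trim_messages merge_and_trim_messages merge_and_trim_messages_alt
  rw [pvLoopA_eq min_length max_total_length conversations [] [] "" (by simp)]
  rw [pvChunkAux_eq_pvChunks _ [] (by simp)]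
  simp
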